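-- pv_equiv track=rewrite | github.com/Workwrite-Niidome/voynich-manuscript-analysis | archive/scripts/stroke_analysis.py | fits_single_syllable
-- ===== SOURCE A (Python) =====
-- def fits_single_syllable(roles):
--     i = 0
--     if i < len(roles) and roles[i] == "INITIAL":
--         i += 1
--     while i < len(roles) and roles[i] == "ONSET":
--         i += 1
--     nc = 0
--     while i < len(roles) and roles[i] == "NUCLEUS":
--         i += 1
--         nc += 1
--     if nc == 0:
--         return False
--     while i < len(roles) and roles[i] == "CODA":
--         i += 1
--     if i < len(roles) and roles[i] == "FINAL":
--         i += 1
--     return i == len(roles)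
-- ===== SOURCE B (Python) =====
-- _RANK = {"INITIAL": 0, "ONSET": 1, "NUCLEUS": 2, "CODA": 3, "FINAL": 4}
--
-- def fits_single_syllable(roles):
--     rs = [_RANK.get(r, -1) for r in roles]
--     if -1 in rs:
--         return False
--     return 2 in rs and all(a < b or a == b and a != 0 and a != 4
--                            for a, b in zip(rs, rs[1:]))
-- ===== Notes on version B (the rewrite author's own statement) =====
-- stated objective: idiomatic
-- what changed: A advances an index through four sequential typed scan loops (greedy parser for I?O*N+C*F?); B instead maps every role to a numeric rank once and checks a single local pairwise non-decreasing condition on the rank list (ranks strictly increase except that ONSET/NUCLEUS/CODA may repeat) plus membership of the NUCLEUS rank.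
import Mathlib
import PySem

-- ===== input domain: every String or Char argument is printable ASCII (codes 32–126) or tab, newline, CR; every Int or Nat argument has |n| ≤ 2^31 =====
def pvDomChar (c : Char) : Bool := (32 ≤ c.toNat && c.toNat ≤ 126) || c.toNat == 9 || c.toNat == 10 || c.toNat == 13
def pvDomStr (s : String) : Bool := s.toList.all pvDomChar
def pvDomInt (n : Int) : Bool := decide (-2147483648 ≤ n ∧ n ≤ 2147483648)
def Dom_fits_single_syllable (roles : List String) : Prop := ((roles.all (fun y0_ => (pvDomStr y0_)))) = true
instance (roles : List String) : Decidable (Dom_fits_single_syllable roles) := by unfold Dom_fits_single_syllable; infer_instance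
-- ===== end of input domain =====

-- B replaces A's four sequential index-advancing scan loops by mapping each role to a
-- numeric rank and checking one local pairwise-order condition on the rank list (idiomatic).

-- ===== PORT A =====
-- while i < len(roles) and roles[i] == t: i += 1
def pvWhileRole (roles : List String) (t : String) (i : Nat) : Nat :=
  if h : roles[i]? = some t then pvWhileRole roles t (i + 1) else i
termination_by roles.length - i
decreasing_by
  have : i < roles.length := (List.getElem?_eq_some_iff.mp h).1
  omega

-- while i < len(roles) and roles[i] == "NUCLEUS": i += 1; nc += 1
def pvWhileNucleus (roles : List String) (i nc : Nat) : Nat × Nat :=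
  if h : roles[i]? = some "NUCLEUS" then pvWhileNucleus roles (i + 1) (nc + 1) else (i, nc)
termination_by roles.length - i
decreasing_by
  have : i < roles.length := (List.getElem?_eq_some_iff.mp h).1
  omega

def fits_single_syllable (roles : List String) : Bool :=
  let i0 : Nat := 0
  let i1 : Nat := if roles[i0]? = some "INITIAL" then i0 + 1 else i0
  let i2 : Nat := pvWhileRole roles "ONSET" i1
  let p : Nat × Nat := pvWhileNucleus roles i2 0
  if p.2 = 0 then false
  else
    let i3 : Nat := pvWhileRole roles "CODA" p.1
    let i4 : Nat := if roles[i3]? = some "FINAL" then i3 + 1 else i3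
    i4 == roles.length

-- ===== PORT B =====
def pvRankDict : PySem.Dict String Int :=
  PySem.Dict.ofList [("INITIAL", 0), ("ONSET", 1), ("NUCLEUS", 2), ("CODA", 3), ("FINAL", 4)]

def fits_single_syllable_alt (roles : List String) : Bool :=
  let rs : List Int := roles.map (fun r => pvRankDict.getD r (-1))
  if rs.contains (-1) then false
  else
    rs.contains 2 &&
      ((rs.zip (rs.drop 1)).all (fun p => p.1 < p.2 || (p.1 == p.2 && p.1 != 0 && p.1 != 4)))

-- ===== PRECONDITION & SPEC =====
def Spec_fits_single_syllable (roles : List String) (out : Bool) : Prop := out = fits_single_syllable_alt roles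
instance (roles : List String) (out : Bool) : Decidable (Spec_fits_single_syllable roles out) := by unfold Spec_fits_single_syllable; infer_instance

-- ===== CLAIM (what is proved, stated in full; the proofs are below) =====
def Claim_equal_fits_single_syllable : Prop := ∀ (roles : List String), Dom_fits_single_syllable roles → Spec_fits_single_syllable roles (fits_single_syllable roles)

-- ===== LEMMAS AND PROOFS =====

-- length of the maximal prefix of t's
def pvLead (t : String) : List String → Nat
  | [] => 0
  | r :: rs => if r = t then pvLead t rs + 1 else 0

theorem pvLead_take (t : String) (l : List String) :
    l.take (pvLead t l) = List.replicate (pvLead t l) t := by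
  induction l with
  | nil => simp [pvLead]
  | cons r rs ih =>
    by_cases h : r = t
    · simp [pvLead, h, List.replicate_succ, ih]
    · simp [pvLead, h]

theorem pvLead_decomp (t : String) (l : List String) :
    l = List.replicate (pvLead t l) t ++ l.drop (pvLead t l) := by
  conv_lhs => rw [← List.take_append_drop (pvLead t l) l]
  rw [pvLead_take]

theorem pvLead_replicate_append (t : String) (n : Nat) (l : List String) :
    pvLead t (List.replicate n t ++ l) = n + pvLead t l := by
  induction n with
  | zero => simp
  | succ n ih => simp [List.replicate_succ, pvLead, ih]; omega

theorem pvLead_of_head_ne (t : String) (l : List String) (h : l.head? ≠ some t) :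
    pvLead t l = 0 := by
  cases l with
  | nil => rfl
  | cons r rs =>
    simp only [List.head?_cons, ne_eq, Option.some.injEq] at h
    simp [pvLead, h]

theorem pvWhileRole_eq (roles : List String) (t : String) (i : Nat) :
    pvWhileRole roles t i = i + pvLead t (roles.drop i) := by
  fun_induction pvWhileRole roles t i with
  | case1 i h ih =>
    have hd : roles.drop i = t :: roles.drop (i + 1) := by
      have h1 : (roles.drop i).head? = some t := by rw [List.head?_drop]; exact h
      have h2 : (roles.drop i).tail = roles.drop (i+1) := List.tail_drop
      cases hl : roles.drop i with
      | nil => rw [hl] at h1; simp at h1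
      | cons x xs =>
        rw [hl] at h1 h2; simp at h1 h2
        simp [h1, ← h2]
    rw [ih, hd]
    simp [pvLead]; omega
  | case2 i h =>
    have h1 : (roles.drop i).head? ≠ some t := by rw [List.head?_drop]; exact h
    rw [pvLead_of_head_ne _ _ h1]; simp

theorem pvWhileNucleus_eq (roles : List String) (i nc : Nat) :
    pvWhileNucleus roles i nc =
      (i + pvLead "NUCLEUS" (roles.drop i), nc + pvLead "NUCLEUS" (roles.drop i)) := by
  fun_induction pvWhileNucleus roles i nc with
  | case1 i nc h ih =>
    have hd : roles.drop i = "NUCLEUS" :: roles.drop (i + 1) := by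
      have h1 : (roles.drop i).head? = some "NUCLEUS" := by rw [List.head?_drop]; exact h
      have h2 : (roles.drop i).tail = roles.drop (i+1) := List.tail_drop
      cases hl : roles.drop i with
      | nil => rw [hl] at h1; simp at h1
      | cons x xs =>
        rw [hl] at h1 h2; simp at h1 h2
        simp [h1, ← h2]
    rw [ih, hd]
    simp [pvLead]; constructor <;> omega
  | case2 i nc h =>
    have h1 : (roles.drop i).head? ≠ some "NUCLEUS" := by rw [List.head?_drop]; exact h
    rw [pvLead_of_head_ne _ _ h1]; simp


theorem pvGetElemCons {l : List String} {i : Nat} {x : String} (h : l[i]? = some x) :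
    l.drop i = x :: l.drop (i + 1) := by
  have h1 : (l.drop i).head? = some x := by rw [List.head?_drop]; exact h
  have h2 : (l.drop i).tail = l.drop (i + 1) := List.tail_drop
  cases hl : l.drop i with
  | nil => rw [hl] at h1; simp at h1
  | cons y ys =>
    rw [hl] at h1 h2; simp at h1 h2
    simp [h1, ← h2]

theorem pvMemNe {l : List String} {t : String} (h : ∀ x ∈ l, x ≠ t) : l.head? ≠ some t := by
  intro hc
  exact h t (List.mem_of_mem_head? (by simp [hc])) rfl

theorem pvLeadZero {l : List String} {t : String} (h : ∀ x ∈ l, x ≠ t) : pvLead t l = 0 :=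
  pvLead_of_head_ne _ _ (pvMemNe h)

theorem pvDropRep (t : String) (n : Nat) (l : List String) :
    (List.replicate n t ++ l).drop n = l := by
  simpa using List.drop_left (List.replicate n t) l

-- the language both programs recognise
def pvCanon (roles : List String) : Prop :=
  ∃ a b c d e : Nat, a ≤ 1 ∧ 1 ≤ c ∧ e ≤ 1 ∧
    roles = List.replicate a "INITIAL" ++ List.replicate b "ONSET" ++
            List.replicate c "NUCLEUS" ++ List.replicate d "CODA" ++ List.replicate e "FINAL"

theorem A_iff (roles : List String) : fits_single_syllable roles = true ↔ pvCanon roles := by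
  constructor
  · intro h
    simp only [fits_single_syllable, pvWhileRole_eq, pvWhileNucleus_eq, Nat.zero_add] at h
    set a := (if roles[0]? = some "INITIAL" then 0 + 1 else 0) with ha
    set b := pvLead "ONSET" (List.drop a roles) with hb
    set c := pvLead "NUCLEUS" (List.drop (a + b) roles) with hc
    set d := pvLead "CODA" (List.drop (a + b + c) roles) with hd
    by_cases hcz : c = 0
    · simp [hcz] at h
    rw [if_neg hcz] at h
    set e := (if roles[a + b + c + d]? = some "FINAL" then 1 else 0) with he
    have htot : a + b + c + d + e = roles.length := by
      split_ifs at h he with hf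
      · simp only [beq_iff_eq] at h; omega
      · simp only [beq_iff_eq] at h; omega
    have h0 : roles = List.replicate a "INITIAL" ++ List.drop a roles := by
      by_cases h0' : roles[0]? = some "INITIAL"
      · rw [ha, if_pos h0']
        have := pvGetElemCons h0'
        simp at this
        rw [this]; simp [List.replicate]
      · rw [ha, if_neg h0']; simp
    have h1 : List.drop a roles = List.replicate b "ONSET" ++ List.drop (a + b) roles := by
      have := pvLead_decomp "ONSET" (List.drop a roles)
      rw [← hb, List.drop_drop] at this
      exact this
    have h2 : List.drop (a + b) roles =
        List.replicate c "NUCLEUS" ++ List.drop (a + b + c) roles := by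
      have := pvLead_decomp "NUCLEUS" (List.drop (a + b) roles)
      rw [← hc, List.drop_drop] at this
      exact this
    have h3 : List.drop (a + b + c) roles =
        List.replicate d "CODA" ++ List.drop (a + b + c + d) roles := by
      have := pvLead_decomp "CODA" (List.drop (a + b + c) roles)
      rw [← hd, List.drop_drop] at this
      exact this
    have h4 : List.drop (a + b + c + d) roles = List.replicate e "FINAL" := by
      by_cases hf : roles[a + b + c + d]? = some "FINAL"
      · rw [he, if_pos hf]
        have := pvGetElemCons hf
        have hend : List.drop (a + b + c + d + 1) roles = [] := by
          apply List.drop_eq_nil_of_le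
          rw [← htot]; simp [he, if_pos hf]
        rw [this, hend]; simp [List.replicate]
      · rw [he, if_neg hf]
        simp only [List.replicate]
        apply List.drop_eq_nil_of_le
        rw [← htot]; simp [he, if_neg hf]
    refine ⟨a, b, c, d, e, ?_, by omega, ?_, ?_⟩
    · rw [ha]; split_ifs <;> omega
    · rw [he]; split_ifs <;> omega
    · rw [h0, h1, h2, h3, h4]; simp [List.append_assoc]
  · rintro ⟨a, b, c, d, e, ha1, hc1, he1, rfl⟩
    obtain ⟨c, rfl⟩ : ∃ c', c = c' + 1 := ⟨c - 1, by omega⟩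
    rw [List.append_assoc, List.append_assoc, List.append_assoc]
    simp only [fits_single_syllable, pvWhileRole_eq, pvWhileNucleus_eq]
    set T3 := List.replicate d "CODA" ++ List.replicate e "FINAL" with hT3
    set T2 := List.replicate (c + 1) "NUCLEUS" ++ T3 with hT2
    set T1 := List.replicate b "ONSET" ++ T2 with hT1
    set roles := List.replicate a "INITIAL" ++ T1 with hroles
    have hI : (if roles[0]? = some "INITIAL" then 0 + 1 else 0) = a := by
      rcases Nat.le_one_iff_eq_zero_or_eq_one.mp ha1 with rfl | rfl
      · rw [if_neg]
        rw [hroles]; simp only [List.replicate, List.nil_append]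
        rw [show (T1[0]?) = T1.head? from (List.head?_eq_getElem? ..).symm]
        apply pvMemNe
        intro x hx
        rw [hT1, hT2, hT3] at hx
        simp only [List.mem_append, List.mem_replicate] at hx
        rcases hx with ⟨-, rfl⟩ | ⟨-, rfl⟩ | ⟨-, rfl⟩ | ⟨-, rfl⟩ <;> decide
      · rw [if_pos]
        rw [hroles]; simp [List.replicate]
    rw [hI]
    have hdA : List.drop a roles = T1 := by rw [hroles]; exact pvDropRep _ _ _
    rw [hdA]
    have hO : pvLead "ONSET" T1 = b := by
      rw [hT1, pvLead_replicate_append, pvLeadZero, Nat.add_zero]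
      intro x hx
      rw [hT2, hT3] at hx
      simp only [List.mem_append, List.mem_replicate] at hx
      rcases hx with ⟨-, rfl⟩ | ⟨-, rfl⟩ | ⟨-, rfl⟩ <;> decide
    rw [hO]
    have hdB : List.drop (a + b) roles = T2 := by
      rw [← List.drop_drop, hdA, hT1, pvDropRep]
    rw [hdB]
    have hN : pvLead "NUCLEUS" T2 = c + 1 := by
      rw [hT2, pvLead_replicate_append, pvLeadZero, Nat.add_zero]
      intro x hx
      rw [hT3] at hx
      simp only [List.mem_append, List.mem_replicate] at hx
      rcases hx with ⟨-, rfl⟩ | ⟨-, rfl⟩ <;> decide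
    rw [hN]
    rw [if_neg (by omega)]
    have hdC : List.drop (a + b + (c + 1)) roles = T3 := by
      rw [← List.drop_drop, hdB, hT2, pvDropRep]
    rw [hdC]
    have hC : pvLead "CODA" T3 = d := by
      rw [hT3, pvLead_replicate_append, pvLeadZero, Nat.add_zero]
      intro x hx
      simp only [List.mem_replicate] at hx
      rcases hx with ⟨-, rfl⟩ <;> decide
    rw [hC]
    have hdD : List.drop (a + b + (c + 1) + d) roles = List.replicate e "FINAL" := by
      rw [← List.drop_drop, hdC, hT3, pvDropRep]
    have hlen : roles.length = a + b + (c + 1) + d + e := by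
      rw [hroles, hT1, hT2, hT3]; simp; omega
    have hgF : roles[a + b + (c + 1) + d]? = (List.replicate e "FINAL").head? := by
      rw [← List.head?_drop, hdD]
    rcases Nat.le_one_iff_eq_zero_or_eq_one.mp he1 with rfl | rfl
    · rw [if_neg (by rw [hgF]; simp)]
      simp only [beq_iff_eq]; omega
    · rw [if_pos (by rw [hgF]; simp [List.replicate])]
      simp only [beq_iff_eq]; omega


-- ===== B-side lemmas =====
def pvRk (r : String) : Int := pvRankDict.getD r (-1)

theorem pvRk_eq (r : String) : pvRk r =
    if r = "INITIAL" then 0 else if r = "ONSET" then 1 else if r = "NUCLEUS" then 2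
    else if r = "CODA" then 3 else if r = "FINAL" then 4 else -1 := by
  have hmk : pvRankDict = PySem.Dict.mk
      [("INITIAL", 0), ("ONSET", 1), ("NUCLEUS", 2), ("CODA", 3), ("FINAL", 4)] := by decide
  rw [pvRk, hmk, PySem.Dict.getD_eq_get?_getD]
  simp only [PySem.Dict.get?_mk_cons]
  split_ifs <;> simp_all [beq_iff_eq] <;> rfl

theorem pvRkI : pvRk "INITIAL" = 0 := by decide
theorem pvRkO : pvRk "ONSET" = 1 := by decide
theorem pvRkN : pvRk "NUCLEUS" = 2 := by decide
theorem pvRkC : pvRk "CODA" = 3 := by decide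
theorem pvRkF : pvRk "FINAL" = 4 := by decide

def pvUnrk (k : Int) : String :=
  if k = 0 then "INITIAL" else if k = 1 then "ONSET" else if k = 2 then "NUCLEUS"
  else if k = 3 then "CODA" else "FINAL"

theorem pvUnrk_rk {r : String} (h : pvRk r ≠ -1) : pvUnrk (pvRk r) = r := by
  rw [pvRk_eq] at h ⊢
  split_ifs at h ⊢ with h1 h2 h3 h4 h5 <;> simp_all [pvUnrk]

def pvPb (x y : Int) : Bool := x < y || (x == y && x != 0 && x != 4)

def pvChain : Int → List Int → Bool
  | _, [] => true
  | k, x :: xs => pvPb k x && pvChain x xs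

theorem pvZipAll (x : Int) (xs : List Int) :
    ((x :: xs).zip ((x :: xs).drop 1)).all
        (fun p => p.1 < p.2 || (p.1 == p.2 && p.1 != 0 && p.1 != 4)) =
      pvChain x xs := by
  induction xs generalizing x with
  | nil => rfl
  | cons y ys ih => simp [pvChain, pvPb, ← ih]

theorem pvChain3_of (d e : Nat) (he : e ≤ 1) :
    pvChain 3 (List.replicate d 3 ++ List.replicate e 4) = true := by
  induction d with
  | zero => rcases Nat.le_one_iff_eq_zero_or_eq_one.mp he with rfl | rfl <;> decide
  | succ d ih => simpa [List.replicate_succ, pvChain, pvPb] using ih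

theorem pvChain2_of (c d e : Nat) (he : e ≤ 1) :
    pvChain 2 (List.replicate c 2 ++ List.replicate d 3 ++ List.replicate e 4) = true := by
  induction c with
  | zero =>
    rcases d with _ | d
    · rcases Nat.le_one_iff_eq_zero_or_eq_one.mp he with rfl | rfl <;> decide
    · simpa [List.replicate_succ, pvChain, pvPb] using pvChain3_of d e he
  | succ c ih => simpa [List.replicate_succ, pvChain, pvPb] using ih

theorem pvChain1_of (b c d e : Nat) (he : e ≤ 1) :
    pvChain 1 (List.replicate b 1 ++ List.replicate c 2 ++ List.replicate d 3 ++
      List.replicate e 4) = true := by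
  induction b with
  | zero =>
    rcases c with _ | c
    · rcases d with _ | d
      · rcases Nat.le_one_iff_eq_zero_or_eq_one.mp he with rfl | rfl <;> decide
      · simpa [List.replicate_succ, pvChain, pvPb] using pvChain3_of d e he
    · simpa [List.replicate_succ, pvChain, pvPb] using pvChain2_of c d e he
  | succ b ih => simpa [List.replicate_succ, pvChain, pvPb] using ih

theorem pvChain0_eq (ks : List Int) : pvChain 0 ks = pvChain 1 ks := by
  cases ks with
  | nil => rfl
  | cons x xs =>
    have hp : pvPb 0 x = pvPb 1 x := by
      rcases lt_trichotomy x 1 with h | rfl | h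
      · simp [pvPb, show ¬(0 : Int) < x by omega, show ¬(1 : Int) < x by omega,
          show (1 : Int) ≠ x by omega]
      · decide
      · simp [pvPb, show (0 : Int) < x by omega, show (1 : Int) < x by omega]
    simp [pvChain, hp]

theorem pvChain4_inv {ks : List Int} (hb : ∀ x ∈ ks, x ≤ 4) (h : pvChain 4 ks = true) :
    ks = [] := by
  cases ks with
  | nil => rfl
  | cons x xs =>
    exfalso
    have hx := hb x List.mem_cons_self
    simp [pvChain, pvPb] at h
    omega

theorem pvChain3_inv {ks : List Int} (hb : ∀ x ∈ ks, x ≤ 4) (h : pvChain 3 ks = true) :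
    ∃ d e : Nat, e ≤ 1 ∧ ks = List.replicate d 3 ++ List.replicate e 4 := by
  induction ks with
  | nil => exact ⟨0, 0, by omega, rfl⟩
  | cons x xs ih =>
    have hx := hb x List.mem_cons_self
    have hb' : ∀ y ∈ xs, y ≤ 4 := fun y hy => hb y (List.mem_cons_of_mem _ hy)
    simp only [pvChain, Bool.and_eq_true] at h
    have hx34 : x = 3 ∨ x = 4 := by
      have := h.1; simp [pvPb] at this; omega
    rcases hx34 with rfl | rfl
    · obtain ⟨d, e, he, hxs⟩ := ih hb' h.2
      exact ⟨d + 1, e, he, by simp [List.replicate_succ, hxs]⟩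
    · have := pvChain4_inv hb' h.2
      exact ⟨0, 1, by omega, by simp [this, List.replicate]⟩

theorem pvChain2_inv {ks : List Int} (hb : ∀ x ∈ ks, x ≤ 4) (h : pvChain 2 ks = true) :
    ∃ c d e : Nat, e ≤ 1 ∧
      ks = List.replicate c 2 ++ List.replicate d 3 ++ List.replicate e 4 := by
  induction ks with
  | nil => exact ⟨0, 0, 0, by omega, rfl⟩
  | cons x xs ih =>
    have hx := hb x List.mem_cons_self
    have hb' : ∀ y ∈ xs, y ≤ 4 := fun y hy => hb y (List.mem_cons_of_mem _ hy)
    simp only [pvChain, Bool.and_eq_true] at h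
    have hx234 : x = 2 ∨ x = 3 ∨ x = 4 := by
      have := h.1; simp [pvPb] at this; omega
    rcases hx234 with rfl | rfl | rfl
    · obtain ⟨c, d, e, he, hxs⟩ := ih hb' h.2
      exact ⟨c + 1, d, e, he, by simp [List.replicate_succ, hxs]⟩
    · obtain ⟨d, e, he, hxs⟩ := pvChain3_inv hb' h.2
      exact ⟨0, d + 1, e, he, by simp [List.replicate_succ, hxs]⟩
    · have := pvChain4_inv hb' h.2
      exact ⟨0, 0, 1, by omega, by simp [this, List.replicate]⟩

theorem pvChain1_inv {ks : List Int} (hb : ∀ x ∈ ks, x ≤ 4) (h : pvChain 1 ks = true) :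
    ∃ b c d e : Nat, e ≤ 1 ∧
      ks = List.replicate b 1 ++ List.replicate c 2 ++ List.replicate d 3 ++
        List.replicate e 4 := by
  induction ks with
  | nil => exact ⟨0, 0, 0, 0, by omega, rfl⟩
  | cons x xs ih =>
    have hx := hb x List.mem_cons_self
    have hb' : ∀ y ∈ xs, y ≤ 4 := fun y hy => hb y (List.mem_cons_of_mem _ hy)
    simp only [pvChain, Bool.and_eq_true] at h
    have hx1234 : x = 1 ∨ x = 2 ∨ x = 3 ∨ x = 4 := by
      have := h.1; simp [pvPb] at this; omega
    rcases hx1234 with rfl | rfl | rfl | rfl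
    · obtain ⟨b, c, d, e, he, hxs⟩ := ih hb' h.2
      exact ⟨b + 1, c, d, e, he, by simp [List.replicate_succ, hxs]⟩
    · obtain ⟨c, d, e, he, hxs⟩ := pvChain2_inv hb' h.2
      exact ⟨0, c + 1, d, e, he, by simp [List.replicate_succ, hxs]⟩
    · obtain ⟨d, e, he, hxs⟩ := pvChain3_inv hb' h.2
      exact ⟨0, 0, d + 1, e, he, by simp [List.replicate_succ, hxs]⟩
    · have := pvChain4_inv hb' h.2
      exact ⟨0, 0, 0, 1, by omega, by simp [this, List.replicate]⟩

theorem B_iff (roles : List String) : fits_single_syllable_alt roles = true ↔ pvCanon roles := by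
  simp only [fits_single_syllable_alt]
  have hfun : (fun r => pvRankDict.getD r (-1)) = pvRk := rfl
  rw [hfun]
  set rs := roles.map pvRk with hrs
  constructor
  · intro h
    by_cases hneg : rs.contains (-1)
    · rw [if_pos hneg] at h; exact absurd h (by simp)
    rw [if_neg hneg] at h
    simp only [Bool.and_eq_true] at h
    obtain ⟨h2, hall⟩ := h
    have hnotneg : (-1 : Int) ∉ rs := by
      intro hmem; exact hneg (List.contains_iff_mem.mpr hmem)
    have hmem : ∀ y ∈ rs, y = 0 ∨ y = 1 ∨ y = 2 ∨ y = 3 ∨ y = 4 := by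
      intro y hy
      obtain ⟨r, hr, rfl⟩ := List.mem_map.mp (hrs ▸ hy)
      have hne : pvRk r ≠ -1 := fun hc => hnotneg (hc ▸ hy)
      rw [pvRk_eq] at hne ⊢
      split_ifs at hne ⊢ <;> simp_all
    have hb : ∀ y ∈ rs, y ≤ 4 := by
      intro y hy; rcases hmem y hy with rfl | rfl | rfl | rfl | rfl <;> omega
    have h2m : (2 : Int) ∈ rs := List.contains_iff_mem.mp h2
    -- rs decomposes into rank blocks
    have hdec : ∃ a b c d e : Nat, a ≤ 1 ∧ e ≤ 1 ∧
        rs = List.replicate a 0 ++ List.replicate b 1 ++ List.replicate c 2 ++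
          List.replicate d 3 ++ List.replicate e 4 := by
      cases hcase : rs with
      | nil => simp [hcase] at h2m
      | cons x xs =>
        rw [hcase] at hall hmem hb
        rw [pvZipAll] at hall
        have hb' : ∀ y ∈ xs, y ≤ 4 := fun y hy => hb y (List.mem_cons_of_mem _ hy)
        rcases hmem x List.mem_cons_self with rfl | rfl | rfl | rfl | rfl
        · rw [pvChain0_eq] at hall
          obtain ⟨b, c, d, e, he, hxs⟩ := pvChain1_inv hb' hall
          exact ⟨1, b, c, d, e, by omega, he, by simp [hxs, List.replicate]⟩
        · obtain ⟨b, c, d, e, he, hxs⟩ := pvChain1_inv hb' hall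
          exact ⟨0, b + 1, c, d, e, by omega, he, by simp [hxs, List.replicate_succ]⟩
        · obtain ⟨c, d, e, he, hxs⟩ := pvChain2_inv hb' hall
          exact ⟨0, 0, c + 1, d, e, by omega, he, by simp [hxs, List.replicate_succ]⟩
        · obtain ⟨d, e, he, hxs⟩ := pvChain3_inv hb' hall
          exact ⟨0, 0, 0, d + 1, e, by omega, he, by simp [hxs, List.replicate_succ]⟩
        · have := pvChain4_inv hb' hall
          exact ⟨0, 0, 0, 0, 1, by omega, by omega, by simp [this, List.replicate]⟩
    obtain ⟨a, b, c, d, e, ha1, he1, hdec⟩ := hdec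
    have hc1 : 1 ≤ c := by
      rcases Nat.eq_zero_or_pos c with rfl | h'
      · exfalso
        rw [hdec] at h2m
        simp [List.mem_append, List.mem_replicate] at h2m
      · exact h'
    have hroles : roles = List.replicate a "INITIAL" ++ List.replicate b "ONSET" ++
        List.replicate c "NUCLEUS" ++ List.replicate d "CODA" ++ List.replicate e "FINAL" := by
      have hid : roles = rs.map pvUnrk := by
        rw [hrs, List.map_map]
        conv_lhs => rw [← List.map_id roles]
        symm
        apply List.map_congr_left
        intro r hr
        have hne : pvRk r ≠ -1 := by
          intro hc
          exact hnotneg (hrs ▸ (hc ▸ List.mem_map_of_mem hr))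
        simpa using pvUnrk_rk hne
      rw [hid, hdec]
      norm_num [List.map_replicate, pvUnrk]
    exact ⟨a, b, c, d, e, ha1, hc1, he1, hroles⟩
  · rintro ⟨a, b, c, d, e, ha1, hc1, he1, rfl⟩
    have hrseq : rs = List.replicate a 0 ++ List.replicate b 1 ++ List.replicate c 2 ++
        List.replicate d 3 ++ List.replicate e 4 := by
      rw [hrs]
      simp [List.map_replicate, pvRkI, pvRkO, pvRkN, pvRkC, pvRkF]
    rw [if_neg (by rw [hrseq]; simp [List.mem_append, List.mem_replicate])]
    have h2 : rs.contains 2 = true := by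
      rw [hrseq]
      simp [List.mem_append, List.mem_replicate]
      omega
    rw [h2]
    simp only [Bool.true_and]
    obtain ⟨c, rfl⟩ : ∃ c', c = c' + 1 := ⟨c - 1, by omega⟩
    rcases Nat.le_one_iff_eq_zero_or_eq_one.mp ha1 with rfl | rfl
    · rcases b with _ | b
      · rw [show rs = (2 : Int) :: (List.replicate c 2 ++ List.replicate d 3 ++
            List.replicate e 4) from by rw [hrseq]; simp [List.replicate_succ]]
        rw [pvZipAll, pvChain2_of c d e he1]
      · rw [show rs = (1 : Int) :: (List.replicate b 1 ++ List.replicate (c + 1) 2 ++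
            List.replicate d 3 ++ List.replicate e 4) from by
          rw [hrseq]; simp [List.replicate_succ]]
        rw [pvZipAll, pvChain1_of b (c + 1) d e he1]
    · rw [show rs = (0 : Int) :: (List.replicate b 1 ++ List.replicate (c + 1) 2 ++
          List.replicate d 3 ++ List.replicate e 4) from by
        rw [hrseq]; simp [List.replicate_succ]]
      rw [pvZipAll, pvChain0_eq, pvChain1_of b (c + 1) d e he1]

-- ===== VERDICT (by name: the statement is the Claim_ definition above) =====
theorem fits_single_syllable_spec : Claim_equal_fits_single_syllable := by
  intro roles _
  unfold Spec_fits_single_syllable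
  rw [Bool.eq_iff_iff, A_iff, B_iff]
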